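-- pv_equiv track=rewrite | github.com/MrHumanRebel/pihole_lists | .github/scripts/adlist_converter.py | cleanAdstr
-- ===== SOURCE A (Python) =====
-- def cleanAdstr(string):
-- 	'''	Get domain from string.
-- 		- excludes: wildcards, incomplete domains
-- 	'''
-- 	for n in range(0, len(string)):
-- 		if string[n] == ("*" or ".js" or "/" or "~"):
-- 			break
-- 		if string[n] == "^":
-- 			return string[:n]
-- 		if string[n] == "$":
-- 			break
-- ===== SOURCE B (Python) =====
-- def cleanAdstr(string):
--     '''Get domain from string: the prefix before the first '^', unless a '*' or '$' precedes it.'''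
--     i = string.find("^")
--     if i == -1:
--         return None
--     pre = string[:i]
--     if "*" in pre or "$" in pre:
--         return None
--     return pre
-- ===== Notes on version B (the rewrite author's own statement) =====
-- stated objective: faster
-- what changed: Replaced A's explicit per-index Python loop with str.find to locate the first caret plus substring membership tests on the prefix before it.
import Mathlib
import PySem

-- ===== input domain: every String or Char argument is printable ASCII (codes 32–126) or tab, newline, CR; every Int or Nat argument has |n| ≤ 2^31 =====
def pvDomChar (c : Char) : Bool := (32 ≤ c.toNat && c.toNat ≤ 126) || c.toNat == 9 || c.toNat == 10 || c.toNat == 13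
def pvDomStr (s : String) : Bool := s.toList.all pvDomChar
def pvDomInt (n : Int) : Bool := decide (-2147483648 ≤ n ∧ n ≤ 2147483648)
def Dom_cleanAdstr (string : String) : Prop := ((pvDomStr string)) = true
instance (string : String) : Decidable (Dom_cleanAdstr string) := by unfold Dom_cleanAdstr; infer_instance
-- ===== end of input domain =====

-- B replaces A's manual index loop by str.find("^") plus substring membership tests on the prefix (constant-factor faster via C-level string primitives).


-- ===== PORT A =====
-- A scans the characters by index; '("*" or ".js" or "/" or "~")' evaluates to "*" in Python,
-- so the first test really only compares against '*'. string[:n] is s.take n.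
def cleanAdstrLoop (s : List Char) : Nat → List Char → Option String
  | _, [] => none
  | n, c :: rest =>
    if c = '*' then none
    else if c = '^' then some (String.ofList (s.take n))
    else if c = '$' then none
    else cleanAdstrLoop s (n + 1) rest

def cleanAdstr (string : String) : Option String :=
  cleanAdstrLoop string.toList 0 string.toList

-- ===== PORT B =====
def cleanAdstr_alt (string : String) : Option String :=
  let i := PySem.Str.find string "^"
  if i = -1 then none
  else
    let pre := PySem.Str.slice string none (some i)
    if PySem.Str.isIn "*" pre || PySem.Str.isIn "$" pre then none
    else some pre

-- ===== PRECONDITION & SPEC =====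
def Spec_cleanAdstr (string : String) (out : Option String) : Prop := out = cleanAdstr_alt string
instance (string : String) (out : Option String) : Decidable (Spec_cleanAdstr string out) := by unfold Spec_cleanAdstr; infer_instance

-- ===== CLAIM (what is proved, stated in full; the proofs are below) =====
def Claim_equal_cleanAdstr : Prop := ∀ (string : String), Dom_cleanAdstr string → Spec_cleanAdstr string (cleanAdstr string)

-- ===== LEMMAS AND PROOFS =====

-- Common reference function: prefix before the first '^', none if '*' or '$' comes first or no '^'.
def cleanRef : List Char → Option (List Char)
  | [] => none
  | c :: rest =>
    if c = '*' ∨ c = '$' then none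
    else if c = '^' then some []
    else (cleanRef rest).map (c :: ·)

theorem singleton_infix_iff {a : Char} {l : List Char} : [a] <:+: l ↔ a ∈ l := by
  constructor
  · intro h; exact h.mem (by simp)
  · intro h
    obtain ⟨p, q, rfl⟩ := List.append_of_mem h
    exact ⟨p, q, by simp⟩

theorem cleanRef_none_of_not_mem {s : List Char} (h : '^' ∉ s) : cleanRef s = none := by
  induction s with
  | nil => rfl
  | cons c rest ih =>
    simp only [List.mem_cons, not_or] at h
    simp [cleanRef, Ne.symm h.1, ih h.2]

theorem cleanRef_of_first {s : List Char} (i : Nat) (hi : s[i]? = some '^')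
    (hmin : ∀ j < i, s[j]? ≠ some '^') :
    cleanRef s = if '*' ∈ s.take i ∨ '$' ∈ s.take i then none else some (s.take i) := by
  induction s generalizing i with
  | nil => simp at hi
  | cons c rest ih =>
    cases i with
    | zero =>
      simp at hi
      simp [cleanRef, hi]
    | succ k =>
      have hc : c ≠ '^' := by
        intro hc; exact hmin 0 (Nat.succ_pos k) (by simp [hc])
      simp only [List.getElem?_cons_succ] at hi
      have hrec := ih k hi (fun j hj => by
        have := hmin (j + 1) (Nat.succ_lt_succ hj)
        simpa using this)
      by_cases h1 : c = '*' ∨ c = '$'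
      · have hQ : '*' ∈ c :: rest.take k ∨ '$' ∈ c :: rest.take k := by
          rcases h1 with h | h
          · exact Or.inl (by simp [h])
          · exact Or.inr (by simp [h])
        rw [List.take_succ_cons]
        simp only [cleanRef, if_pos h1, if_pos hQ]
      · have h1' : c ≠ '*' ∧ c ≠ '$' := by tauto
        have hQ : ('*' ∈ c :: rest.take k ∨ '$' ∈ c :: rest.take k)
            ↔ ('*' ∈ rest.take k ∨ '$' ∈ rest.take k) := by
          simp [List.mem_cons, Ne.symm h1'.1, Ne.symm h1'.2]
        simp only [cleanRef, if_neg h1, if_neg hc, hrec, List.take_succ_cons]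
        split_ifs with hP hQ' hQ'
        · rfl
        · exact absurd (hQ.mpr hP) hQ'
        · exact absurd (hQ.mp hQ') hP
        · rfl

theorem loop_eq_ref (p rest : List Char) :
    cleanAdstrLoop (p ++ rest) p.length rest = (cleanRef rest).map (fun t => String.ofList (p ++ t)) := by
  induction rest generalizing p with
  | nil => rfl
  | cons c rest ih =>
    by_cases h1 : c = '*' ∨ c = '$'
    · rcases h1 with h | h <;> simp [cleanAdstrLoop, cleanRef, h]
    · rw [not_or] at h1
      by_cases h2 : c = '^'
      · simp [cleanAdstrLoop, cleanRef, h2]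
      · have hstep : p ++ c :: rest = (p ++ [c]) ++ rest := by simp
        have hlen : p.length + 1 = (p ++ [c]).length := by simp
        simp only [cleanAdstrLoop, if_neg h1.1, if_neg h2, if_neg h1.2, cleanRef, hstep, hlen,
          ih (p ++ [c])]
        cases cleanRef rest <;> simp [h1.1, h1.2]

theorem a_eq_ref (s : String) :
    cleanAdstr s = (cleanRef s.toList).map (fun t => String.ofList t) := by
  have := loop_eq_ref [] s.toList
  simpa [cleanAdstr] using this

theorem alt_eq_ref (s : String) :
    cleanAdstr_alt s = (cleanRef s.toList).map (fun t => String.ofList t) := by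
  unfold cleanAdstr_alt
  have hfind : PySem.Str.find s "^" = PySem.Chars.find s.toList ['^'] := PySem.Str.find_eq s "^"
  by_cases h : PySem.Chars.find s.toList ['^'] = -1
  · have hmem : '^' ∉ s.toList := fun hm =>
      ((PySem.Chars.find_eq_neg_one_iff s.toList ['^']).mp h) (singleton_infix_iff.mpr hm)
    simp only [hfind, if_pos h, cleanRef_none_of_not_mem hmem, Option.map_none]
  · have hpos : 0 ≤ PySem.Chars.find s.toList ['^'] := by
      have := PySem.Chars.neg_one_le_find (s := s.toList) (sub := ['^'])
      omega
    set i := (PySem.Chars.find s.toList ['^']).toNat with hidef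
    obtain ⟨⟨t, ht⟩, hmin0⟩ := PySem.Chars.find_spec (s := s.toList) (sub := ['^']) hpos
    have hdrop : s.toList.drop i = '^' :: t := by rw [← ht]; rfl
    have hget : s.toList[i]? = some '^' := by
      have h0 : (s.toList.drop i)[0]? = s.toList[i]? := by
        simp [List.getElem?_drop]
      rw [← h0, hdrop]; rfl
    have hmin : ∀ j < i, s.toList[j]? ≠ some '^' := by
      intro j hj hget'
      have hjlen : j < s.toList.length := (List.getElem?_eq_some_iff.mp hget').1
      apply hmin0 j hj
      rw [List.drop_eq_getElem_cons hjlen]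
      refine ⟨s.toList.drop (j + 1), ?_⟩
      have hv : s.toList[j] = '^' := by
        have := (List.getElem?_eq_getElem hjlen).symm.trans hget'
        simpa using this
      simp [hv]
    have href := cleanRef_of_first i hget hmin
    have hslice : (PySem.Str.slice s none (some (PySem.Str.find s "^"))).toList = s.toList.take i := by
      rw [PySem.Str.toList_slice, hfind, PySem.Chars.slice_eq_listSlice, PySem.List.slice_to s.toList hpos]
    have hstr : PySem.Str.slice s none (some (PySem.Str.find s "^")) = String.ofList (s.toList.take i) := by
      have h2 := congrArg String.ofList hslice
      rwa [String.ofList_toList] at h2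
    have hisin : ∀ (c : Char) (cs : String), cs.toList = [c] →
        (PySem.Str.isIn cs (PySem.Str.slice s none (some (PySem.Str.find s "^"))) = true
          ↔ c ∈ s.toList.take i) := by
      intro c cs hcs
      rw [PySem.Str.isIn_eq, hcs, hslice]
      exact (PySem.Chars.isIn_iff_infix _ _).trans singleton_infix_iff
    rw [hfind] at hstr hisin ⊢
    simp only [if_neg h, href]
    by_cases hm : '*' ∈ s.toList.take i ∨ '$' ∈ s.toList.take i
    · have hor : (PySem.Str.isIn "*" (PySem.Str.slice s none (some (PySem.Chars.find s.toList ['^'])))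
          || PySem.Str.isIn "$" (PySem.Str.slice s none (some (PySem.Chars.find s.toList ['^'])))) = true := by
        rw [Bool.or_eq_true]
        rcases hm with hm | hm
        · exact Or.inl ((hisin '*' "*" rfl).mpr hm)
        · exact Or.inr ((hisin '$' "$" rfl).mpr hm)
      simp only [hor, if_pos hm, if_true, Option.map_none]
    · have h1 : PySem.Str.isIn "*" (PySem.Str.slice s none (some (PySem.Chars.find s.toList ['^']))) = false := by
        rw [Bool.eq_false_iff]
        exact fun hx => hm (Or.inl ((hisin '*' "*" rfl).mp hx))
      have h2 : PySem.Str.isIn "$" (PySem.Str.slice s none (some (PySem.Chars.find s.toList ['^']))) = false := by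
        rw [Bool.eq_false_iff]
        exact fun hx => hm (Or.inr ((hisin '$' "$" rfl).mp hx))
      rw [hstr] at h1 h2
      simp only [PySem.Str.isIn_eq, String.toList_ofList] at h1 h2
      simp [if_neg hm, hstr]
      exact ⟨h1, h2⟩

-- ===== VERDICT (by name: the statement is the Claim_ definition above) =====
theorem cleanAdstr_spec : Claim_equal_cleanAdstr := by
  intro s _
  unfold Spec_cleanAdstr
  rw [a_eq_ref, alt_eq_ref]
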